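-- pv_equiv track=rewrite | github.com/ssantofimio/contabo-server-ubuntu | odoo_projects/odoo17-custom-addons/synconics_bi_dashboard/models/dashboard.py | find_next_position
-- ===== SOURCE A (Python) =====
-- def find_next_position(items, new_width, grid_columns=12):
--     """
--     In case of in any charts positioning is not saved then this function will evaluate positioning
--     """
--     if not items:
--         return (0, 0)
--     last_y = max((item["y"] for item in items if item["y"]), default=0)
--     last_row = [item for item in items if item["y"] == last_y]
--
--     used = sum(item["w"] for item in last_row)
--     next_x = max((item["x"] + item["w"] for item in last_row), default=0)
--     return (
--         (next_x, last_y)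
--         if used + new_width <= grid_columns
--         else (0, last_y + max(item["h"] or 2 for item in last_row))
--     )
-- ===== SOURCE B (Python) =====
-- def find_next_position(items, new_width, grid_columns=12):
--     if not items:
--         return (0, 0)
--     # one pass: group items by their y value
--     groups = {}
--     for item in items:
--         groups.setdefault(item["y"], []).append(item)
--     last_y = max((y for y in groups if y), default=0)
--     row = groups[last_y]
--     first = row[0]
--     used = first["w"]
--     next_x = first["x"] + first["w"]
--     fallback_h = first["h"] or 2
--     for item in row[1:]:
--         used += item["w"]
--         next_x = max(next_x, item["x"] + item["w"])
--         fallback_h = max(fallback_h, item["h"] or 2)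
--     if used + new_width <= grid_columns:
--         return (next_x, last_y)
--     return (0, last_y + fallback_h)
-- ===== Notes on version B (the rewrite author's own statement) =====
-- stated objective: alternative
-- what changed: Replaces A's four separate comprehension passes (filtered max over all items, last-row filter, sum, two maxes over the row) by one grouping pass building a dict from y-value to its items, then a single accumulator fold over the selected row computing used width, next x and fallback height together.
import Mathlib
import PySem

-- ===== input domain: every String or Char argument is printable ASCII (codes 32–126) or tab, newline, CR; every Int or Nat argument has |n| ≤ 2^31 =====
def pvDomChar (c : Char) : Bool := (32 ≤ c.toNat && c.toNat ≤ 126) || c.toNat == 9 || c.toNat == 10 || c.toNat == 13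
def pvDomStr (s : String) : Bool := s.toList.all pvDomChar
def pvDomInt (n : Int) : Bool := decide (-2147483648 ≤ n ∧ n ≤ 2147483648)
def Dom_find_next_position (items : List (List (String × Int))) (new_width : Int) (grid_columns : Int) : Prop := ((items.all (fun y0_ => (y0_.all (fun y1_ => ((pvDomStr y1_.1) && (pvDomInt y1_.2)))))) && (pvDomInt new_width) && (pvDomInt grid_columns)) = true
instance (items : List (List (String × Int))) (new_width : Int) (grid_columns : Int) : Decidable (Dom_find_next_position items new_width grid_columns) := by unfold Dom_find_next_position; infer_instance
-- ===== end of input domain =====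

-- B replaces A's four separate passes (filtered max, list comprehension, sum, two maxes)
-- by one grouping pass over the items plus one accumulator pass over the selected row
-- (objective: alternative decomposition, same asymptotic cost).

-- item["k"] on an item dict (Pre_ guarantees the key is present wherever Python reads it)
def pvKey (it : List (String × Int)) (k : String) : Int := (PySem.Dict.mk it).getD k 0

-- Python max(l, default=d)
def pyMaxD (l : List Int) (d : Int) : Int :=
  match l with
  | [] => d
  | x :: xs => xs.foldl max x

-- item["h"] or 2
def pvHor2 (it : List (String × Int)) : Int :=
  if pvKey it "h" = 0 then 2 else pvKey it "h"

-- ===== PORT A =====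
def find_next_position (items : List (List (String × Int))) (new_width : Int) (grid_columns : Int) : Int × Int :=
  if items = [] then (0, 0)
  else
    let last_y := pyMaxD ((items.map (fun it => pvKey it "y")).filter (fun y => y != 0)) 0
    let last_row := items.filter (fun it => pvKey it "y" == last_y)
    let used := (last_row.map (fun it => pvKey it "w")).sum
    let next_x := pyMaxD (last_row.map (fun it => pvKey it "x" + pvKey it "w")) 0
    if used + new_width ≤ grid_columns then (next_x, last_y)
    else (0, last_y + pyMaxD (last_row.map pvHor2) 0)  -- last_row is provably nonempty, so the default is never used (Python has none)

-- ===== PORT B =====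
def find_next_position_alt (items : List (List (String × Int))) (new_width : Int) (grid_columns : Int) : Int × Int :=
  match items with
  | [] => (0, 0)
  | _ :: _ =>
    let groups : PySem.Dict Int (List (List (String × Int))) :=
      items.foldl (fun g it => g.modify (pvKey it "y") [] (fun r => r ++ [it])) PySem.Dict.empty
    let last_y := pyMaxD (groups.keys.filter (fun y => y != 0)) 0
    match groups.getD last_y [] with
    | [] => (0, 0)  -- unreachable totality guard: Python's groups[last_y] would raise, but the group always exists
    | first :: rest =>
      let z := rest.foldl
        (fun acc it => (acc.1 + pvKey it "w",
                        max acc.2.1 (pvKey it "x" + pvKey it "w"),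
                        max acc.2.2 (pvHor2 it)))
        (pvKey first "w", pvKey first "x" + pvKey first "w", pvHor2 first)
      if z.1 + new_width ≤ grid_columns then (z.2.1, last_y) else (0, last_y + z.2.2)

-- ===== PRECONDITION & SPEC =====
-- the y value A maxes over (needed to say which items Python actually indexes with "x"/"w"/"h")
def pvLastY (items : List (List (String × Int))) : Int :=
  pyMaxD ((items.map (fun it => pvKey it "y")).filter (fun y => y != 0)) 0

-- Pre_ excludes exactly the inputs on which Python A raises KeyError: every item needs key "y",
-- and every item of the selected last row additionally needs keys "x", "w", "h".
def Pre_find_next_position (items : List (List (String × Int))) (new_width : Int) (grid_columns : Int) : Prop :=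
  (∀ it ∈ items, ((PySem.Dict.mk it).get? "y").isSome) ∧
  (∀ it ∈ items, pvKey it "y" = pvLastY items →
    ((PySem.Dict.mk it).get? "x").isSome ∧ ((PySem.Dict.mk it).get? "w").isSome ∧ ((PySem.Dict.mk it).get? "h").isSome)
instance (items : List (List (String × Int))) (new_width : Int) (grid_columns : Int) : Decidable (Pre_find_next_position items new_width grid_columns) := by unfold Pre_find_next_position; infer_instance

def pvWitness_find_next_position : (List (List (String × Int))) × Int × Int :=
  ([[("x", 0), ("y", 1), ("w", 4), ("h", 2)], [("x", 4), ("y", 1), ("w", 4), ("h", 3)]], 6, 12)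

def Spec_find_next_position (items : List (List (String × Int))) (new_width : Int) (grid_columns : Int) (out : Int × Int) : Prop := out = find_next_position_alt items new_width grid_columns
instance (items : List (List (String × Int))) (new_width : Int) (grid_columns : Int) (out : Int × Int) : Decidable (Spec_find_next_position items new_width grid_columns out) := by unfold Spec_find_next_position; infer_instance

-- ===== CLAIM (what is proved, stated in full; the proofs are below) =====
def Claim_equal_find_next_position : Prop := ∀ (items : List (List (String × Int))) (new_width : Int) (grid_columns : Int), Dom_find_next_position items new_width grid_columns → Pre_find_next_position items new_width grid_columns → Spec_find_next_position items new_width grid_columns (find_next_position items new_width grid_columns)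

-- ===== LEMMAS AND PROOFS =====

theorem pvWitness_ok :
    Dom_find_next_position pvWitness_find_next_position.1 pvWitness_find_next_position.2.1 pvWitness_find_next_position.2.2 ∧
    Pre_find_next_position pvWitness_find_next_position.1 pvWitness_find_next_position.2.1 pvWitness_find_next_position.2.2 := by
  decide

-- foldl max: the result is the start or a list element, and bounds everything
theorem foldl_max_mem (l : List Int) (a : Int) : l.foldl max a = a ∨ l.foldl max a ∈ l := by
  induction l generalizing a with
  | nil => left; rfl
  | cons x xs ih =>
    rw [List.foldl_cons]
    rcases ih (max a x) with h | h
    · rw [h]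
      rcases le_total a x with hax | hax
      · right; rw [max_eq_right hax]; simp
      · left; exact max_eq_left hax
    · right; exact List.mem_cons_of_mem _ h

theorem le_foldl_max (l : List Int) (a : Int) : a ≤ l.foldl max a ∧ ∀ x ∈ l, x ≤ l.foldl max a := by
  induction l generalizing a with
  | nil => exact ⟨le_refl _, by simp⟩
  | cons y ys ih =>
    obtain ⟨h1, h2⟩ := ih (max a y)
    refine ⟨le_trans (le_max_left a y) h1, ?_⟩
    intro x hx
    rcases hx with _ | hx
    · exact le_trans (le_max_right a y) h1
    · exact h2 x (by assumption)

theorem pyMaxD_spec (l : List Int) (d : Int) (h : l ≠ []) :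
    pyMaxD l d ∈ l ∧ ∀ x ∈ l, x ≤ pyMaxD l d := by
  match l with
  | x :: xs =>
    obtain ⟨h1, h2⟩ := le_foldl_max xs x
    constructor
    · rcases foldl_max_mem xs x with h' | h'
      · simp [pyMaxD, h']
      · right; simpa [pyMaxD] using h'
    · intro z hz
      rcases hz with _ | hz
      · exact h1
      · exact h2 z (by assumption)

theorem pyMaxD_congr (l1 l2 : List Int) (d : Int) (h : ∀ x, x ∈ l1 ↔ x ∈ l2) :
    pyMaxD l1 d = pyMaxD l2 d := by
  cases l1 with
  | nil =>
    have h2 : l2 = [] := by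
      cases l2 with
      | nil => rfl
      | cons y ys => exact absurd ((h y).mpr (by simp)) (by simp)
    simp [h2]
  | cons x xs =>
    have hne2 : l2 ≠ [] := by
      intro hnil
      exact absurd ((h x).mp (by simp)) (by simp [hnil])
    obtain ⟨m1, b1⟩ := pyMaxD_spec (x :: xs) d (by simp)
    obtain ⟨m2, b2⟩ := pyMaxD_spec l2 d hne2
    exact le_antisymm (b2 _ ((h _).mp m1)) (b1 _ ((h _).mpr m2))

theorem map_snd_filter_fst (as : List (List (String × Int))) (y : Int) :
    ((as.map (fun it => (pvKey it "y", it))).filter (fun p => p.1 == y)).map (fun x => x.2)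
      = as.filter (fun it => pvKey it "y" == y) := by
  induction as with
  | nil => rfl
  | cons a as ih => by_cases hy : pvKey a "y" = y <;> simp [hy, ih]

-- B's grouping dict: the group at y is exactly A's filter of items with that y
theorem groups_getD (items : List (List (String × Int))) (y : Int) :
    (items.foldl (fun g it => g.modify (pvKey it "y") [] (fun r => r ++ [it])) PySem.Dict.empty).getD y []
      = items.filter (fun it => pvKey it "y" == y) := by
  have h := PySem.Dict.getD_foldl_modify_append
    (l := items.map (fun it => (pvKey it "y", it))) (d := PySem.Dict.empty) (c := y)
  rw [List.foldl_map] at h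
  simp only [PySem.Dict.getD_empty, List.nil_append] at h
  rw [h]
  exact map_snd_filter_fst items y

-- B's group keys have the same members as A's list of y values
theorem groups_keys_mem (items : List (List (String × Int))) (z : Int) :
    z ∈ (items.foldl (fun g it => g.modify (pvKey it "y") [] (fun r => r ++ [it])) PySem.Dict.empty).keys
      ↔ z ∈ items.map (fun it => pvKey it "y") := by
  rw [PySem.Dict.keys_foldl_modify_key]
  simp [PySem.Dict.keys_empty, PySem.Set.update_nil_left, PySem.Set.mem_ofList]

-- the accumulator fold of B computes A's sum and the two maxes
theorem foldl_triple (l : List (List (String × Int))) (a b c : Int) :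
    l.foldl (fun acc it => (acc.1 + pvKey it "w",
                            max acc.2.1 (pvKey it "x" + pvKey it "w"),
                            max acc.2.2 (pvHor2 it))) (a, b, c)
      = (a + (l.map (fun it => pvKey it "w")).sum,
         (l.map (fun it => pvKey it "x" + pvKey it "w")).foldl max b,
         (l.map pvHor2).foldl max c) := by
  induction l generalizing a b c with
  | nil => simp
  | cons x xs ih => simp [List.foldl, ih]; ring

-- ===== VERDICT (by name: the statement is the Claim_ definition above) =====
theorem pyMaxD_cons (a : Int) (l : List Int) (d : Int) : pyMaxD (a :: l) d = l.foldl max a := rfl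

theorem find_next_position_spec : Claim_equal_find_next_position := by
  intro items new_width grid_columns _ _
  unfold Spec_find_next_position
  match items with
  | [] => rfl
  | i0 :: is =>
    have hlast : pyMaxD ((((i0 :: is).foldl (fun g it => g.modify (pvKey it "y") [] (fun r => r ++ [it])) PySem.Dict.empty).keys).filter (fun y => y != 0)) 0
        = pyMaxD (((i0 :: is).map (fun it => pvKey it "y")).filter (fun y => y != 0)) 0 := by
      apply pyMaxD_congr
      intro z
      simp only [List.mem_filter]
      rw [groups_keys_mem]
    have hex : ∃ it ∈ (i0 :: is),
        pvKey it "y" = pyMaxD (((i0 :: is).map (fun it => pvKey it "y")).filter (fun y => y != 0)) 0 := by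
      by_cases hL : ((i0 :: is).map (fun it => pvKey it "y")).filter (fun y => y != 0) = []
      · refine ⟨i0, by simp, ?_⟩
        rw [hL]
        have := List.filter_eq_nil_iff.mp hL (pvKey i0 "y") (by simp)
        simpa [pyMaxD] using this
      · obtain ⟨hm, -⟩ := pyMaxD_spec _ 0 hL
        obtain ⟨hmem, -⟩ := List.mem_filter.mp hm
        obtain ⟨it, hit, hy⟩ := List.mem_map.mp hmem
        exact ⟨it, hit, hy⟩
    obtain ⟨it0, hit0, hy0⟩ := hex
    have hne : (i0 :: is).filter
        (fun it => pvKey it "y" == pyMaxD (((i0 :: is).map (fun it => pvKey it "y")).filter (fun y => y != 0)) 0) ≠ [] :=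
      List.ne_nil_of_mem (List.mem_filter.mpr ⟨hit0, by simp [hy0]⟩)
    obtain ⟨first, rest, hfr⟩ := List.exists_cons_of_ne_nil hne
    simp only [find_next_position, find_next_position_alt]
    rw [if_neg (by simp : ¬(i0 :: is = []))]
    rw [hlast, groups_getD, hfr]
    dsimp only
    rw [foldl_triple]
    simp only [List.map_cons, List.sum_cons, pyMaxD_cons]
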